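-- pv_equiv track=rewrite | github.com/Ag3497120/verantyx-v6 | arc/world_priors.py | _paste
-- ===== SOURCE A (Python) =====
-- def _paste(grid, patch, r0, c0, bg):
--     """Paste patch onto grid at position (r0, c0), skipping bg."""
--     result = [row[:] for row in grid]
--     ph, pw = len(patch), len(patch[0])
--     h, w = len(grid), len(grid[0])
--     for r in range(ph):
--         for c in range(pw):
--             nr, nc = r0+r, c0+c
--             if 0<=nr<h and 0<=nc<w and patch[r][c] != bg:
--                 result[nr][nc] = patch[r][c]
--     return result
-- ===== SOURCE B (Python) =====
-- def _paste(grid, patch, r0, c0, bg):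
--     """Paste patch onto grid at position (r0, c0), skipping bg."""
--     ph, pw = len(patch), len(patch[0])
--     h, w = len(grid), len(grid[0])
--     return [[patch[i - r0][j - c0]
--              if j < w and 0 <= i - r0 < ph and 0 <= j - c0 < pw and patch[i - r0][j - c0] != bg
--              else x
--              for j, x in enumerate(row)]
--             for i, row in enumerate(grid)]
-- ===== Notes on version B (the rewrite author's own statement) =====
-- stated objective: alternative
-- what changed: A copies the grid and loops over the patch writing cells into the copy; B builds the result in one read-only pass over the grid's own cells, selecting each output cell from the patch window or the grid.
import Mathlib
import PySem

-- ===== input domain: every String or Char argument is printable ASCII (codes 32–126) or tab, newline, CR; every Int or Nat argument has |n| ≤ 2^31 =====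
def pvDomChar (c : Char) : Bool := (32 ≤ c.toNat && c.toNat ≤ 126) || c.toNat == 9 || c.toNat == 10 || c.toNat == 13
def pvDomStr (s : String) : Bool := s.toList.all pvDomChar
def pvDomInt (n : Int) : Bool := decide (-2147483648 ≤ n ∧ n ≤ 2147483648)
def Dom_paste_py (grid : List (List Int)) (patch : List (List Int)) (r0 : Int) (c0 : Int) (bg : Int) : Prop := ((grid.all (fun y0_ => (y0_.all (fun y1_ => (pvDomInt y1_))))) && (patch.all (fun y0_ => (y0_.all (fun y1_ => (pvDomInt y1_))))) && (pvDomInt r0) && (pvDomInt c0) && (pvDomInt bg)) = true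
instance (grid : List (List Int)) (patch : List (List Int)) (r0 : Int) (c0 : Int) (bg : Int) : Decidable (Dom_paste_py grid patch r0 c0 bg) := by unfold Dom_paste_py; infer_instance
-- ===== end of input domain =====

-- B replaces A's copy-then-nested-write loop over the patch by a single read-only comprehension
-- over the grid's own rows that pulls each cell from the patch window (objective: alternative).
-- A mutates its local copy only; neither program mutates the caller's arguments.

-- ===== PORT A =====
-- result[nr][nc] = v  (nr, nc are in range whenever the Python write succeeds)
def pasteWrite (res : List (List Int)) (nr : Int) (nc : Int) (v : Int) : List (List Int) :=
  PySem.List.pySetD res nr (PySem.List.pySetD (PySem.List.pyGetD res nr []) nc v)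

-- the body of A's innermost loop for one (r, c)
def pasteCell (patch : List (List Int)) (r0 : Int) (c0 : Int) (bg : Int) (h : Int) (w : Int)
    (res : List (List Int)) (r : Int) (c : Int) : List (List Int) :=
  let nr := r0 + r
  let nc := c0 + c
  if 0 ≤ nr ∧ nr < h ∧ 0 ≤ nc ∧ nc < w ∧ PySem.List.pyGetD (PySem.List.pyGetD patch r []) c 0 ≠ bg
  then pasteWrite res nr nc (PySem.List.pyGetD (PySem.List.pyGetD patch r []) c 0)
  else res

def paste_py (grid : List (List Int)) (patch : List (List Int)) (r0 : Int) (c0 : Int) (bg : Int) : List (List Int) :=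
  let result := grid.map (fun row => PySem.List.slice row none none)
  let ph : Int := patch.length
  let pw : Int := (PySem.List.pyGetD patch 0 []).length
  let h : Int := grid.length
  let w : Int := (PySem.List.pyGetD grid 0 []).length
  (PySem.List.pyRange 0 ph 1).foldl
    (fun res r =>
      (PySem.List.pyRange 0 pw 1).foldl (fun res c => pasteCell patch r0 c0 bg h w res r c) res)
    result

-- ===== PORT B =====
-- one row of B's comprehension: [ … for j, x in enumerate(row) ]
def pasteSel (patch : List (List Int)) (r0 : Int) (c0 : Int) (bg : Int) (ph : Int) (pw : Int) (w : Int)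
    (i : Int) (row : List Int) : List Int :=
  (PySem.List.enumerate row 0).map (fun jx =>
    if jx.1 < w ∧ 0 ≤ i - r0 ∧ i - r0 < ph ∧ 0 ≤ jx.1 - c0 ∧ jx.1 - c0 < pw ∧
       PySem.List.pyGetD (PySem.List.pyGetD patch (i - r0) []) (jx.1 - c0) 0 ≠ bg
    then PySem.List.pyGetD (PySem.List.pyGetD patch (i - r0) []) (jx.1 - c0) 0
    else jx.2)

def paste_py_alt (grid : List (List Int)) (patch : List (List Int)) (r0 : Int) (c0 : Int) (bg : Int) : List (List Int) :=
  let ph : Int := patch.length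
  let pw : Int := (PySem.List.pyGetD patch 0 []).length
  let h : Int := grid.length
  let w : Int := (PySem.List.pyGetD grid 0 []).length
  (PySem.List.enumerate grid 0).map (fun ir => pasteSel patch r0 c0 bg ph pw w ir.1 ir.2)

-- ===== PRECONDITION & SPEC =====
-- Pre_ excludes exactly the inputs on which Python A raises: empty grid/patch (len(patch[0]) /
-- len(grid[0]) IndexError), patch reads patch[r][c] past a ragged row, and writes past a ragged
-- grid row; on all other inputs A returns normally.
def Pre_paste_py (grid : List (List Int)) (patch : List (List Int)) (r0 : Int) (c0 : Int) (bg : Int) : Prop :=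
  patch ≠ [] ∧ grid ≠ [] ∧
  ∀ r : Nat, r < patch.length → ∀ c : Nat, c < (patch.getD 0 []).length →
    (0 ≤ r0 + (r : Int) ∧ r0 + (r : Int) < (grid.length : Int) ∧
     0 ≤ c0 + (c : Int) ∧ c0 + (c : Int) < ((grid.getD 0 []).length : Int)) →
      c < (patch.getD r []).length ∧
      ((patch.getD r []).getD c 0 ≠ bg → c0 + (c : Int) < ((grid.getD (r0 + (r : Int)).toNat []).length : Int))

instance (grid : List (List Int)) (patch : List (List Int)) (r0 : Int) (c0 : Int) (bg : Int) : Decidable (Pre_paste_py grid patch r0 c0 bg) := by unfold Pre_paste_py; infer_instance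

def pvWitness_paste_py : List (List Int) × List (List Int) × Int × Int × Int :=
  ([[1, 2], [3, 4]], [[5]], 0, 1, 0)

def Spec_paste_py (grid : List (List Int)) (patch : List (List Int)) (r0 : Int) (c0 : Int) (bg : Int) (out : List (List Int)) : Prop := out = paste_py_alt grid patch r0 c0 bg
instance (grid : List (List Int)) (patch : List (List Int)) (r0 : Int) (c0 : Int) (bg : Int) (out : List (List Int)) : Decidable (Spec_paste_py grid patch r0 c0 bg out) := by unfold Spec_paste_py; infer_instance

-- ===== CLAIM (what is proved, stated in full; the proofs are below) =====
def Claim_equal_paste_py : Prop := ∀ (grid : List (List Int)) (patch : List (List Int)) (r0 : Int) (c0 : Int) (bg : Int), Dom_paste_py grid patch r0 c0 bg → Pre_paste_py grid patch r0 c0 bg → Spec_paste_py grid patch r0 c0 bg (paste_py grid patch r0 c0 bg)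

-- ===== LEMMAS AND PROOFS =====

lemma pyGetD_nonneg {α : Type} (xs : List α) (i : Int) (d : α) (h : 0 ≤ i) :
    PySem.List.pyGetD xs i d = xs.getD i.toNat d := by
  obtain ⟨n, rfl⟩ : ∃ n : Nat, i = (n : Int) := ⟨i.toNat, (Int.toNat_of_nonneg h).symm⟩
  simp [PySem.List.pyGetD_natCast]

lemma getD_set_getD (l : List Int) (n j : Nat) (v : Int) :
    (l.set n v).getD j 0 = if j = n ∧ j < l.length then v else l.getD j 0 := by
  simp only [List.getD, List.getElem?_set]
  split_ifs with h1 h2 h3 h3 <;> simp_all <;> omega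

lemma write_length (res : List (List Int)) (nr nc v : Int) (h0 : 0 ≤ nr) :
    (pasteWrite res nr nc v).length = res.length := by
  unfold pasteWrite
  rw [PySem.List.pySetD_of_nonneg _ _ h0]
  simp

lemma write_getD (res : List (List Int)) (nr nc v : Int) (h0 : 0 ≤ nr) (h1 : 0 ≤ nc) (i : Nat) :
    (pasteWrite res nr nc v).getD i [] =
      if i = nr.toNat then (res.getD i []).set nc.toNat v else res.getD i [] := by
  unfold pasteWrite
  rw [PySem.List.pySetD_of_nonneg _ _ h0, PySem.List.pySetD_of_nonneg _ _ h1,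
      pyGetD_nonneg _ _ _ h0]
  simp only [List.getD, List.getElem?_set]
  by_cases hi : nr.toNat = i
  · subst hi
    by_cases hlt : nr.toNat < res.length
    · simp [hlt]
    · simp [hlt]
  · rw [if_neg hi, if_neg (fun hh => hi hh.symm)]

lemma cell_length (patch : List (List Int)) (r0 c0 bg h w : Int) (res : List (List Int)) (r c : Int) :
    (pasteCell patch r0 c0 bg h w res r c).length = res.length := by
  simp only [pasteCell]
  split_ifs with hG
  · exact write_length _ _ _ _ hG.1
  · rfl

lemma cell_rowlen (patch : List (List Int)) (r0 c0 bg h w : Int) (res : List (List Int)) (r c : Int) (i : Nat) :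
    ((pasteCell patch r0 c0 bg h w res r c).getD i []).length = (res.getD i []).length := by
  simp only [pasteCell]
  split_ifs with hG
  · rw [write_getD _ _ _ _ hG.1 hG.2.2.1]
    split_ifs <;> simp
  · rfl

lemma cell_gv (patch : List (List Int)) (r0 c0 bg h w : Int) (res : List (List Int)) (r c : Int) (i j : Nat) :
    ((pasteCell patch r0 c0 bg h w res r c).getD i []).getD j 0 =
      if (i : Int) = r0 + r ∧ (j : Int) = c0 + c ∧ (i : Int) < h ∧ (j : Int) < w ∧
         j < (res.getD i []).length ∧ PySem.List.pyGetD (PySem.List.pyGetD patch r []) c 0 ≠ bg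
      then PySem.List.pyGetD (PySem.List.pyGetD patch r []) c 0
      else (res.getD i []).getD j 0 := by
  simp only [pasteCell]
  by_cases hG : 0 ≤ r0 + r ∧ r0 + r < h ∧ 0 ≤ c0 + c ∧ c0 + c < w ∧
      PySem.List.pyGetD (PySem.List.pyGetD patch r []) c 0 ≠ bg
  · rw [if_pos hG, write_getD _ _ _ _ hG.1 hG.2.2.1]
    have hne := hG.2.2.2.2
    by_cases hi : i = (r0 + r).toNat
    · rw [if_pos hi, getD_set_getD]
      simp only [ne_eq, hne, not_false_iff, and_true]
      split_ifs <;> first | rfl | omega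
    · rw [if_neg hi]
      simp only [ne_eq, hne, not_false_iff, and_true]
      rw [if_neg (by omega)]
  · rw [if_neg hG, if_neg]
    rintro ⟨h1, h2, h3, h4, h5, h6⟩
    exact hG ⟨by omega, by omega, by omega, by omega, h6⟩

-- the inner loop  for c in range(m)  of A, starting from res, for a fixed r
def innerF (patch : List (List Int)) (r0 c0 bg h w : Int) (r : Int) (res : List (List Int)) (m : Nat) : List (List Int) :=
  (PySem.List.pyRange 0 (m : Int) 1).foldl (fun res c => pasteCell patch r0 c0 bg h w res r c) res

lemma innerF_succ (patch : List (List Int)) (r0 c0 bg h w : Int) (r : Int) (res : List (List Int)) (m : Nat) :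
    innerF patch r0 c0 bg h w r res (m + 1) =
      pasteCell patch r0 c0 bg h w (innerF patch r0 c0 bg h w r res m) r (m : Int) := by
  unfold innerF
  rw [show ((m + 1 : Nat) : Int) = (m : Int) + 1 by push_cast; ring,
      PySem.List.pyRange_one_succ_right (by positivity), List.foldl_append]
  rfl

lemma innerF_length (patch : List (List Int)) (r0 c0 bg h w : Int) (r : Int) (res : List (List Int)) (m : Nat) :
    (innerF patch r0 c0 bg h w r res m).length = res.length := by
  induction m with
  | zero => unfold innerF; rw [PySem.List.pyRange_one_eq_nil (by simp)]; rfl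
  | succ m ih => rw [innerF_succ, cell_length, ih]

lemma innerF_rowlen (patch : List (List Int)) (r0 c0 bg h w : Int) (r : Int) (res : List (List Int)) (m : Nat) (i : Nat) :
    ((innerF patch r0 c0 bg h w r res m).getD i []).length = (res.getD i []).length := by
  induction m with
  | zero => unfold innerF; rw [PySem.List.pyRange_one_eq_nil (by simp)]; rfl
  | succ m ih => rw [innerF_succ, cell_rowlen, ih]

lemma innerF_gv (patch : List (List Int)) (r0 c0 bg h w : Int) (r : Int) (res : List (List Int)) (m : Nat) (i j : Nat) :
    ((innerF patch r0 c0 bg h w r res m).getD i []).getD j 0 =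
      if (i : Int) = r0 + r ∧ 0 ≤ (j : Int) - c0 ∧ (j : Int) - c0 < (m : Int) ∧ (i : Int) < h ∧ (j : Int) < w ∧
         j < (res.getD i []).length ∧
         PySem.List.pyGetD (PySem.List.pyGetD patch r []) ((j : Int) - c0) 0 ≠ bg
      then PySem.List.pyGetD (PySem.List.pyGetD patch r []) ((j : Int) - c0) 0
      else (res.getD i []).getD j 0 := by
  induction m with
  | zero =>
    unfold innerF
    rw [PySem.List.pyRange_one_eq_nil (by simp)]
    rw [if_neg (by rintro ⟨_, _, h3, _⟩; omega)]
    rfl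
  | succ m ih =>
    rw [innerF_succ, cell_gv, innerF_rowlen, ih]
    by_cases hc : (i : Int) = r0 + r ∧ (j : Int) = c0 + (m : Int)
    · have hjc : (j : Int) - c0 = (m : Int) := by omega
      rw [hjc]
      by_cases hne : PySem.List.pyGetD (PySem.List.pyGetD patch r []) (m : Int) 0 = bg
      · simp only [ne_eq, hne, not_true_eq_false, and_false, if_false]
      · simp only [ne_eq, hne, not_false_iff, and_true]
        split_ifs <;> first | rfl | omega
    · rw [if_neg (by rintro ⟨h1, h2, _⟩; exact hc ⟨h1, h2⟩)]
      apply if_congr _ rfl rfl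
      constructor
      · rintro ⟨h1, h2, h3, h4, h5, h6, h7⟩
        exact ⟨h1, h2, by omega, h4, h5, h6, h7⟩
      · rintro ⟨h1, h2, h3, h4, h5, h6, h7⟩
        refine ⟨h1, h2, ?_, h4, h5, h6, h7⟩
        omega

-- the outer loop  for r in range(n)  of A
def outerF (patch : List (List Int)) (r0 c0 bg h w : Int) (pwN : Nat) (res : List (List Int)) (n : Nat) : List (List Int) :=
  (PySem.List.pyRange 0 (n : Int) 1).foldl (fun res r => innerF patch r0 c0 bg h w r res pwN) res

lemma outerF_succ (patch : List (List Int)) (r0 c0 bg h w : Int) (pwN : Nat) (res : List (List Int)) (n : Nat) :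
    outerF patch r0 c0 bg h w pwN res (n + 1) =
      innerF patch r0 c0 bg h w (n : Int) (outerF patch r0 c0 bg h w pwN res n) pwN := by
  unfold outerF
  rw [show ((n + 1 : Nat) : Int) = (n : Int) + 1 by push_cast; ring,
      PySem.List.pyRange_one_succ_right (by positivity), List.foldl_append]
  rfl

lemma outerF_length (patch : List (List Int)) (r0 c0 bg h w : Int) (pwN : Nat) (res : List (List Int)) (n : Nat) :
    (outerF patch r0 c0 bg h w pwN res n).length = res.length := by
  induction n with
  | zero => unfold outerF; rw [PySem.List.pyRange_one_eq_nil (by simp)]; rfl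
  | succ n ih => rw [outerF_succ, innerF_length, ih]

lemma outerF_rowlen (patch : List (List Int)) (r0 c0 bg h w : Int) (pwN : Nat) (res : List (List Int)) (n : Nat) (i : Nat) :
    ((outerF patch r0 c0 bg h w pwN res n).getD i []).length = (res.getD i []).length := by
  induction n with
  | zero => unfold outerF; rw [PySem.List.pyRange_one_eq_nil (by simp)]; rfl
  | succ n ih => rw [outerF_succ, innerF_rowlen, ih]

lemma outerF_gv (patch : List (List Int)) (r0 c0 bg h w : Int) (pwN : Nat) (res : List (List Int)) (n : Nat) (i j : Nat) :
    ((outerF patch r0 c0 bg h w pwN res n).getD i []).getD j 0 =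
      if 0 ≤ (i : Int) - r0 ∧ (i : Int) - r0 < (n : Int) ∧ 0 ≤ (j : Int) - c0 ∧ (j : Int) - c0 < (pwN : Int) ∧
         (i : Int) < h ∧ (j : Int) < w ∧ j < (res.getD i []).length ∧
         PySem.List.pyGetD (PySem.List.pyGetD patch ((i : Int) - r0) []) ((j : Int) - c0) 0 ≠ bg
      then PySem.List.pyGetD (PySem.List.pyGetD patch ((i : Int) - r0) []) ((j : Int) - c0) 0
      else (res.getD i []).getD j 0 := by
  induction n with
  | zero =>
    unfold outerF
    rw [PySem.List.pyRange_one_eq_nil (by simp)]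
    rw [if_neg (by rintro ⟨_, h2, _⟩; omega)]
    rfl
  | succ n ih =>
    rw [outerF_succ, innerF_gv, outerF_rowlen, ih]
    by_cases hc : (i : Int) - r0 = (n : Int)
    · rw [← hc]
      by_cases hne : PySem.List.pyGetD (PySem.List.pyGetD patch ((i : Int) - r0) []) ((j : Int) - c0) 0 = bg
      · simp only [ne_eq, hne, not_true_eq_false, and_false, if_false]
      · simp only [ne_eq, hne, not_false_iff, and_true]
        split_ifs <;> first | rfl | omega
    · rw [if_neg (by rintro ⟨h1, _⟩; exact hc (by omega))]
      apply if_congr _ rfl rfl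
      constructor
      · rintro ⟨h1, h2, h3, h4, h5, h6, h7, h8⟩
        exact ⟨h1, by omega, h3, h4, h5, h6, h7, h8⟩
      · rintro ⟨h1, h2, h3, h4, h5, h6, h7, h8⟩
        refine ⟨h1, ?_, h3, h4, h5, h6, h7, h8⟩
        omega

lemma map_slice_id (grid : List (List Int)) :
    grid.map (fun row => PySem.List.slice row none none) = grid := by
  simp [PySem.List.slice_none_none]

lemma paste_py_eq_outerF (grid patch : List (List Int)) (r0 c0 bg : Int) :
    paste_py grid patch r0 c0 bg =
      outerF patch r0 c0 bg (grid.length : Int) ((PySem.List.pyGetD grid 0 []).length : Int)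
        (PySem.List.pyGetD patch 0 []).length grid patch.length := by
  simp only [paste_py, outerF, innerF]
  rw [map_slice_id]

lemma enum_map_getD {α β : Type} (xs : List α) (f : Int × α → β) (dα : α) (dβ : β) (i : Nat)
    (hi : i < xs.length) :
    ((PySem.List.enumerate xs 0).map f).getD i dβ = f ((i : Int), xs.getD i dα) := by
  rw [PySem.List.enumerate_eq_map_pyRange xs dα, List.map_map]
  have h := PySem.List.pyGetD_map_pyRange
    (f := fun j => f (j, PySem.List.pyGetD xs j dα)) (n := xs.length) (k := i) dβ hi
  rw [PySem.List.pyGetD_natCast] at h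
  simpa [PySem.List.pyGetD_natCast] using h

lemma alt_length (grid patch : List (List Int)) (r0 c0 bg : Int) :
    (paste_py_alt grid patch r0 c0 bg).length = grid.length := by
  simp only [paste_py_alt]
  simp [PySem.List.length_enumerate]

lemma alt_getD (grid patch : List (List Int)) (r0 c0 bg : Int) (i : Nat) (hi : i < grid.length) :
    (paste_py_alt grid patch r0 c0 bg).getD i [] =
      pasteSel patch r0 c0 bg (patch.length : Int) ((PySem.List.pyGetD patch 0 []).length : Int)
        ((PySem.List.pyGetD grid 0 []).length : Int) (i : Int) (grid.getD i []) := by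
  simp only [paste_py_alt]
  exact enum_map_getD grid _ [] [] i hi

lemma pasteSel_length (patch : List (List Int)) (r0 c0 bg ph pw w : Int) (i : Int) (row : List Int) :
    (pasteSel patch r0 c0 bg ph pw w i row).length = row.length := by
  simp only [pasteSel]
  simp [PySem.List.length_enumerate]

lemma pasteSel_getD (patch : List (List Int)) (r0 c0 bg ph pw w : Int) (i : Int) (row : List Int)
    (j : Nat) (hj : j < row.length) :
    (pasteSel patch r0 c0 bg ph pw w i row).getD j 0 =
      if (j : Int) < w ∧ 0 ≤ i - r0 ∧ i - r0 < ph ∧ 0 ≤ (j : Int) - c0 ∧ (j : Int) - c0 < pw ∧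
         PySem.List.pyGetD (PySem.List.pyGetD patch (i - r0) []) ((j : Int) - c0) 0 ≠ bg
      then PySem.List.pyGetD (PySem.List.pyGetD patch (i - r0) []) ((j : Int) - c0) 0
      else row.getD j 0 := by
  simp only [pasteSel]
  rw [enum_map_getD row _ 0 0 j hj]

-- ===== VERDICT (by name: the statement is the Claim_ definition above) =====
theorem paste_py_spec : Claim_equal_paste_py := by
  intro grid patch r0 c0 bg _ _
  unfold Spec_paste_py
  apply List.ext_getElem
  · rw [paste_py_eq_outerF, outerF_length, alt_length]
  · intro i hiA hiB
    have hi : i < grid.length := by rwa [alt_length] at hiB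
    rw [← List.getD_eq_getElem _ [] hiA, ← List.getD_eq_getElem _ [] hiB,
        paste_py_eq_outerF, alt_getD grid patch r0 c0 bg i hi]
    apply List.ext_getElem
    · rw [outerF_rowlen, pasteSel_length]
    · intro j hjA hjB
      have hj : j < (grid.getD i []).length := by
        have h' := hjA
        rwa [outerF_rowlen] at h'
      rw [← List.getD_eq_getElem _ 0 hjA, ← List.getD_eq_getElem _ 0 hjB,
          outerF_gv, pasteSel_getD _ _ _ _ _ _ _ _ _ j (by rwa [pasteSel_length] at hjB)]
      have hiI : (i : Int) < (grid.length : Int) := by exact_mod_cast hi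
      by_cases hne : PySem.List.pyGetD (PySem.List.pyGetD patch ((i : Int) - r0) []) ((j : Int) - c0) 0 = bg
      · simp only [ne_eq, hne, not_true_eq_false, and_false, if_false]
      · simp only [ne_eq, hne, not_false_iff, and_true]
        split_ifs <;> first | rfl | omega
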